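-- pv_equiv track=rewrite | github.com/MrAdam101/page-calculator | utils/logic.py | split_remaining_pages
-- ===== SOURCE A (Python) =====
-- def split_remaining_pages(current_page, last_page, total_lessons):
--     next_page = current_page + 1
--     pages_left = last_page - current_page
--
--     if total_lessons <= 0 or pages_left <= 0:
--         return [], pages_left
--
--     base_pages = pages_left // total_lessons
--     extra_pages = pages_left % total_lessons
--
--     plan = []
--     page_start = next_page
--
--     for i in range(total_lessons):
--         pages_this_lesson = base_pages + (1 if i < extra_pages else 0)
--
--         if pages_this_lesson > 0:
--             page_end = page_start + pages_this_lesson - 1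
--             plan.append((page_start, page_end))
--             page_start = page_end + 1
--         else:
--             plan.append(("Review", "Review"))
--
--     return plan, pages_left
-- ===== SOURCE B (Python) =====
-- def split_remaining_pages(current_page, last_page, total_lessons):
--     pages_left = last_page - current_page
--     if total_lessons <= 0 or pages_left <= 0:
--         return [], pages_left
--     base = pages_left // total_lessons
--     extra = pages_left % total_lessons
--     next_page = current_page + 1
--
--     def lesson(i):
--         n = base + (1 if i < extra else 0)
--         if n <= 0:
--             return ("Review", "Review")
--         start = next_page + base * i + min(i, extra)
--         return (start, start + n - 1)
--
--     return [lesson(i) for i in range(total_lessons)], pages_left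
-- ===== Notes on version B (the rewrite author's own statement) =====
-- stated objective: alternative
-- what changed: B replaces A's loop-carried running page_start accumulator with a per-index closed form (start = next_page + base*i + min(i, extra)), building the plan as a stateless comprehension.
import Mathlib
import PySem

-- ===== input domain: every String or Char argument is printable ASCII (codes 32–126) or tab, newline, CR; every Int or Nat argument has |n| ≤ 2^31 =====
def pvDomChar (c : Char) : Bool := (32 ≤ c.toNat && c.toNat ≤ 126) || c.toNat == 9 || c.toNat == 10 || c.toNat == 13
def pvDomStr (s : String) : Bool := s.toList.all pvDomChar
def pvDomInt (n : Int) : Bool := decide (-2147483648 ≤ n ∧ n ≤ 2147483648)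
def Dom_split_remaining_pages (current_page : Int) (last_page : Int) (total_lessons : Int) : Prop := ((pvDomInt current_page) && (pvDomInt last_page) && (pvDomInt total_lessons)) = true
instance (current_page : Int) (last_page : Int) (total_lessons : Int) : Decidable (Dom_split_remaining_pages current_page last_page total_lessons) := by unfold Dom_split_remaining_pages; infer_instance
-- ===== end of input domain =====

-- B replaces A's loop-carried running page_start with a per-index closed form
-- (start = next_page + base*i + min(i, extra)); same guards and return shape, no speed claim.

-- ===== PORT A =====
-- Python's ("Review","Review") tuple is a pair of STRINGS, not representable in List (Int × Int);
-- Pre_ excludes the inputs reaching that branch, so the (0, 0) placeholder below is never claimed about.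
def split_remaining_pages (current_page : Int) (last_page : Int) (total_lessons : Int) : (List (Int × Int)) × Int :=
  let next_page := current_page + 1
  let pages_left := last_page - current_page
  if total_lessons ≤ 0 ∨ pages_left ≤ 0 then ([], pages_left)
  else
    let base_pages := PySem.Int.floordiv pages_left total_lessons
    let extra_pages := PySem.Int.mod pages_left total_lessons
    let st := (PySem.List.pyRange 0 total_lessons 1).foldl
      (fun (st : List (Int × Int) × Int) i =>
        let pages_this_lesson := base_pages + (if i < extra_pages then 1 else 0)
        if pages_this_lesson > 0 then
          let page_end := st.2 + pages_this_lesson - 1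
          (st.1 ++ [(st.2, page_end)], page_end + 1)
        else
          (st.1 ++ [(0, 0)], st.2))  -- Python appends ("Review","Review") here; excluded by Pre_
      ([], next_page)
    (st.1, pages_left)

-- ===== PORT B =====
def split_remaining_pages_alt (current_page : Int) (last_page : Int) (total_lessons : Int) : (List (Int × Int)) × Int :=
  let pages_left := last_page - current_page
  if total_lessons ≤ 0 ∨ pages_left ≤ 0 then ([], pages_left)
  else
    let base := PySem.Int.floordiv pages_left total_lessons
    let extra := PySem.Int.mod pages_left total_lessons
    let next_page := current_page + 1
    let lesson : Int → Int × Int := fun i =>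
      let n := base + (if i < extra then 1 else 0)
      if n ≤ 0 then (0, 0)  -- Python returns ("Review","Review") here; excluded by Pre_
      else
        let start := next_page + base * i + min i extra
        (start, start + n - 1)
    ((PySem.List.pyRange 0 total_lessons 1).map lesson, pages_left)

-- ===== PRECONDITION & SPEC =====
-- Pre_ excludes inputs on which A RETURNS, but the returned list contains the string pair
-- ("Review","Review") (reached exactly when 0 < pages_left < total_lessons), which is not a
-- value of the declared type List (Int × Int); B returns the same value there.
def Pre_split_remaining_pages (current_page : Int) (last_page : Int) (total_lessons : Int) : Prop :=
  total_lessons ≤ 0 ∨ last_page - current_page ≤ 0 ∨ total_lessons ≤ last_page - current_page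
instance (current_page : Int) (last_page : Int) (total_lessons : Int) : Decidable (Pre_split_remaining_pages current_page last_page total_lessons) := by unfold Pre_split_remaining_pages; infer_instance
def pvWitness_split_remaining_pages : Int × Int × Int := (3, 13, 4)

def Spec_split_remaining_pages (current_page : Int) (last_page : Int) (total_lessons : Int) (out : (List (Int × Int)) × Int) : Prop := out = split_remaining_pages_alt current_page last_page total_lessons
instance (current_page : Int) (last_page : Int) (total_lessons : Int) (out : (List (Int × Int)) × Int) : Decidable (Spec_split_remaining_pages current_page last_page total_lessons out) := by unfold Spec_split_remaining_pages; infer_instance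

-- ===== CLAIM (what is proved, stated in full; the proofs are below) =====
def Claim_equal_split_remaining_pages : Prop := ∀ (current_page : Int) (last_page : Int) (total_lessons : Int), Dom_split_remaining_pages current_page last_page total_lessons → Pre_split_remaining_pages current_page last_page total_lessons → Spec_split_remaining_pages current_page last_page total_lessons (split_remaining_pages current_page last_page total_lessons)

-- ===== LEMMAS AND PROOFS =====

-- Loop invariant: folding A's step over range(0, m) produces B's per-index closed forms
-- plus the running start np + base*m + min m extra.
theorem pv_fold_closed (np base extra : Int) (hb : 1 ≤ base) (he : 0 ≤ extra)
    (m : Int) (hm : 0 ≤ m) :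
    (PySem.List.pyRange 0 m 1).foldl
      (fun (st : List (Int × Int) × Int) i =>
        if base + (if i < extra then 1 else 0) > 0 then
          (st.1 ++ [(st.2, st.2 + (base + (if i < extra then 1 else 0)) - 1)],
           st.2 + (base + (if i < extra then 1 else 0)) - 1 + 1)
        else (st.1 ++ [(0, 0)], st.2))
      ([], np)
    = ((PySem.List.pyRange 0 m 1).map (fun i =>
        if base + (if i < extra then 1 else 0) ≤ 0 then (0, 0)
        else (np + base * i + min i extra,
              np + base * i + min i extra + (base + (if i < extra then 1 else 0)) - 1)),
       np + base * m + min m extra) := by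
  induction m, hm using Int.le_induction with
  | base =>
      rw [PySem.List.pyRange_one_eq_nil (le_refl 0)]
      simp only [List.foldl_nil, List.map_nil, Prod.mk.injEq]
      exact ⟨trivial, by omega⟩
  | succ m hm ih =>
      rw [PySem.List.pyRange_one_succ_right hm, List.foldl_append, List.map_append, ih]
      have hp : base + (if m < extra then (1:Int) else 0) > 0 := by split_ifs <;> omega
      have hn : ¬ base + (if m < extra then (1:Int) else 0) ≤ 0 := by omega
      simp only [List.foldl_cons, List.foldl_nil, List.map_cons, List.map_nil]
      rw [if_pos hp, if_neg hn]
      have h1 : min (m + 1) extra = min m extra + (if m < extra then (1:Int) else 0) := by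
        split_ifs <;> omega
      refine Prod.ext rfl ?_
      rw [h1, mul_add, mul_one]
      ring

-- ===== VERDICT (by name: the statement is the Claim_ definition above) =====
theorem split_remaining_pages_spec : Claim_equal_split_remaining_pages := by
  intro c l t _ hpre
  unfold Spec_split_remaining_pages split_remaining_pages split_remaining_pages_alt
  by_cases h : t ≤ 0 ∨ l - c ≤ 0
  · rw [if_pos h, if_pos h]
  · rw [if_neg h, if_neg h]
    rw [not_or, not_le, not_le] at h
    have ht : 0 < t := h.1
    have hpl : t ≤ l - c := by rcases hpre with h1 | h1 | h1 <;> omega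
    have hbase : 1 ≤ PySem.Int.floordiv (l - c) t := by
      rw [PySem.Int.floordiv_eq_ediv_of_pos ht]
      rw [Int.le_ediv_iff_mul_le ht]; omega
    have hextra : 0 ≤ PySem.Int.mod (l - c) t := by
      rw [PySem.Int.mod_eq_emod_of_pos ht]
      exact Int.emod_nonneg _ (by omega)
    dsimp only
    rw [pv_fold_closed (c + 1) (PySem.Int.floordiv (l - c) t) (PySem.Int.mod (l - c) t)
      hbase hextra t (by omega)]
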